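-- pv_equiv track=rewrite | github.com/Marisa-Chan/Xen-O-Proto | tools/Data/extract_gImgSrc.py | szpow2
-- ===== SOURCE A (Python) =====
-- def szpow2(sz):
-- 	tmp = 1;
-- 	if sz >= 1024:
-- 		return 512
--
-- 	while tmp < sz:
-- 		tmp <<= 1
--
-- 	if tmp != sz:
-- 		return tmp >> 1
-- 	return tmp
-- ===== SOURCE B (Python) =====
-- def szpow2(sz):
--     if sz >= 1024:
--         return 512
--     if sz < 1:
--         return 0
--     return 1 << (sz.bit_length() - 1)
-- ===== Notes on version B (the rewrite author's own statement) =====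
-- stated objective: idiomatic
-- what changed: Replaces the doubling while-loop and post-adjustment with a closed-form expression 1 << (sz.bit_length() - 1) under the same >=1024 cap, plus an explicit 0 for sz < 1.
import Mathlib
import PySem

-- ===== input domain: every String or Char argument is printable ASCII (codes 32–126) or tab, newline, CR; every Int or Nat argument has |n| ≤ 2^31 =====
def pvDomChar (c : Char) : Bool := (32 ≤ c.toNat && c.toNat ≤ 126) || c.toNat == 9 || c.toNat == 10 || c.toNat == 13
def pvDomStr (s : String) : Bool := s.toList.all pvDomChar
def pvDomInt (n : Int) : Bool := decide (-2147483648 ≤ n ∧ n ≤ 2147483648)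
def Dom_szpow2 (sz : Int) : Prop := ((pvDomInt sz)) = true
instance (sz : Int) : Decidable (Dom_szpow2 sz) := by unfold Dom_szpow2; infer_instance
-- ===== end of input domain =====

-- B replaces A's doubling while-loop (and its halving post-adjustment) with the
-- closed-form 1 << (sz.bit_length() - 1) under the same >= 1024 cap; same values everywhere.

-- ===== PORT A =====
-- the `while tmp < sz: tmp <<= 1` loop; `tmp <<= 1` doubles tmp (exact for ints)
def szpow2Loop (sz tmp : Int) (h : 1 ≤ tmp) : Int :=
  if _hlt : tmp < sz then szpow2Loop sz (2 * tmp) (by omega) else tmp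
termination_by (sz - tmp).toNat
decreasing_by omega

def szpow2 (sz : Int) : Int :=
  if sz ≥ 1024 then 512
  else
    let tmp := szpow2Loop sz 1 (by norm_num)
    if tmp ≠ sz then tmp >>> (1:Nat) else tmp  -- Python `tmp >> 1` = arithmetic shift, exact

-- ===== PORT B =====
-- Python sz.bit_length() for sz ≥ 1 equals Nat.log2 sz + 1 (exact on that range)
def szpow2_alt (sz : Int) : Int :=
  if sz ≥ 1024 then 512
  else if sz < 1 then 0
  else ((1 <<< (sz.toNat.log2 + 1 - 1) : Nat) : Int)

-- ===== PRECONDITION & SPEC =====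
def Spec_szpow2 (sz : Int) (out : Int) : Prop := out = szpow2_alt sz
instance (sz : Int) (out : Int) : Decidable (Spec_szpow2 sz out) := by unfold Spec_szpow2; infer_instance

-- ===== CLAIM (what is proved, stated in full; the proofs are below) =====
def Claim_equal_szpow2 : Prop := ∀ (sz : Int), Dom_szpow2 sz → Spec_szpow2 sz (szpow2 sz)

-- ===== LEMMAS AND PROOFS =====

theorem szpow2Loop_ge (sz tmp : Int) (h : 1 ≤ tmp) (hge : sz ≤ tmp) :
    szpow2Loop sz tmp h = tmp := by
  rw [szpow2Loop]
  simp only [dif_neg (by omega : ¬ tmp < sz)]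

theorem szpow2Loop_pow (sz : Int) (L : Nat)
    (hL1 : (2:Int)^L ≤ sz) (hL2 : sz < 2^(L+1)) :
    ∀ k : Nat, k ≤ L → szpow2Loop sz ((2:Int)^k) (one_le_pow₀ (by norm_num)) =
      if sz = 2^L then (2:Int)^L else 2^(L+1) := by
  intro k hk
  induction hn : L - k generalizing k with
  | zero =>
      have hkL : k = L := by omega
      subst hkL
      rw [szpow2Loop]
      by_cases hlt : (2:Int)^k < sz
      · simp only [dif_pos hlt]
        have h2 : 2 * (2:Int)^k = 2^(k+1) := by ring
        have hpos : (1:Int) ≤ 2 * 2^k := by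
          have := one_le_pow₀ (n := k) (by norm_num : (1:Int) ≤ 2); linarith
        have : szpow2Loop sz (2 * 2^k) hpos = 2 * 2^k :=
          szpow2Loop_ge sz _ _ (by rw [h2]; omega)
        rw [this, h2, if_neg (by omega)]
      · simp only [dif_neg hlt]
        rw [if_pos (by omega)]
  | succ n ih =>
      have hklt : k < L := by omega
      have hlt : (2:Int)^k < sz := by
        calc (2:Int)^k < 2^L := by
              apply pow_lt_pow_right₀ (by norm_num) hklt
          _ ≤ sz := hL1
      rw [szpow2Loop]
      simp only [dif_pos hlt]
      have h2 : 2 * (2:Int)^k = 2^(k+1) := by ring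
      have hpos : (1:Int) ≤ 2 * 2^k := by
        have := one_le_pow₀ (n := k) (by norm_num : (1:Int) ≤ 2); linarith
      have hcast : szpow2Loop sz (2 * 2^k) hpos =
          szpow2Loop sz (2^(k+1)) (one_le_pow₀ (by norm_num)) := by
        congr 1
      rw [hcast]
      exact ih (k+1) (by omega) (by omega)

theorem szpow2_spec_aux (sz : Int) : szpow2 sz = szpow2_alt sz := by
  unfold szpow2 szpow2_alt
  by_cases hcap : sz ≥ 1024
  · simp [hcap]
  · simp only [if_neg hcap]
    by_cases hz : sz < 1
    · -- loop never runs: tmp = 1, 1 ≠ sz, returns 1 >>> 1 = 0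
      rw [szpow2Loop_ge sz 1 (by norm_num) (by omega)]
      rw [if_pos hz, if_pos (by omega : (1:Int) ≠ sz)]
      decide
    · -- 1 ≤ sz < 1024
      rw [if_neg hz]
      set L := sz.toNat.log2 with hLdef
      have hne : sz.toNat ≠ 0 := by omega
      have hL1 : (2:Int)^L ≤ sz := by
        have h := Nat.log2_self_le hne
        have : ((2^L : Nat) : Int) ≤ ((sz.toNat : Nat) : Int) := by exact_mod_cast h
        push_cast at this
        omega
      have hL2 : sz < 2^(L+1) := by
        have h := Nat.lt_log2_self (n := sz.toNat)
        have : ((sz.toNat : Nat) : Int) < ((2^(L+1) : Nat) : Int) := by exact_mod_cast h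
        push_cast at this
        omega
      have hloop : szpow2Loop sz 1 (by norm_num) =
          if sz = 2^L then (2:Int)^L else 2^(L+1) := by
        have h0 : szpow2Loop sz ((2:Int)^0) (one_le_pow₀ (by norm_num)) =
            if sz = 2^L then (2:Int)^L else 2^(L+1) :=
          szpow2Loop_pow sz L hL1 hL2 0 (Nat.zero_le L)
        simpa using h0
      rw [hloop]
      have hshift : ((1 <<< (L + 1 - 1) : Nat) : Int) = 2^L := by
        simp [Nat.shiftLeft_eq]
      by_cases hpow : sz = 2^L
      · rw [if_pos hpow, if_neg (by omega : ¬ (2:Int)^L ≠ sz), hshift]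
      · rw [if_neg hpow, if_pos (by omega : (2:Int)^(L+1) ≠ sz), hshift]
        have h1 : (2:Int)^(L+1) >>> (1:Nat) = 2^(L+1) / ((2^1 : Nat) : Int) :=
          Int.shiftRight_eq_div_pow _ _
        have h2 : (2:Int)^(L+1) / ((2^1 : Nat) : Int) = 2^L := by
          push_cast
          rw [pow_succ]
          exact Int.mul_ediv_cancel _ (by norm_num)
        rw [h1, h2]

-- ===== VERDICT (by name: the statement is the Claim_ definition above) =====
theorem szpow2_spec : Claim_equal_szpow2 := by
  intro sz _
  exact szpow2_spec_aux sz
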